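-- pv_equiv track=rewrite | github.com/Hawkeyes1/portfolio | bootstrap-percolation/perc.py | spans
-- ===== SOURCE A (Python) =====
-- import copy
--
-- def neighbors(previous,x,y):
-- 	total=0
-- 	n = len(previous)
-- 	# previous[x][y]==0, so we can simplify by including previous[x][y]
-- 	# as a possible neighbor instead of excluding.
-- 	total += sum( [previous[x][a] for a in range(n)] )
-- 	total += sum( [previous[a][y] for a in range(n)] )
-- 	return total
--
-- def advance(grid,threshold=2):
-- 	previous = copy.copy(grid)
-- 	n = len(grid)
-- 	altered = False
-- 	for x in range(n):
-- 		for y in range(n):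
-- 			if previous[x][y] == 1: continue
-- 			elif neighbors(previous,x,y) >= threshold:
-- 				grid[x][y] = 1
-- 				altered = True
-- 	return altered
--
-- def spans(grid,threshold=2):
-- 	while advance(grid,threshold):
-- 		pass
-- 	n=len(grid)
-- 	for x in range(n):
-- 		for y in range(n):
-- 			if grid[x][y]==0:
-- 				return False
-- 	return True
-- ===== SOURCE B (Python) =====
-- def spans(grid, threshold=2):
--     n = len(grid)
--     while True:
--         rsum = [sum(grid[x][a] for a in range(n)) for x in range(n)]
--         csum = [sum(grid[a][y] for a in range(n)) for y in range(n)]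
--         altered = False
--         for x in range(n):
--             row = grid[x]
--             for y in range(n):
--                 v = row[y]
--                 if v != 1 and rsum[x] + csum[y] >= threshold:
--                     row[y] = 1
--                     rsum[x] += 1 - v
--                     csum[y] += 1 - v
--                     altered = True
--         if not altered:
--             break
--     return all(grid[x][y] != 0 for x in range(n) for y in range(n))
-- ===== Notes on version B (the rewrite author's own statement) =====
-- stated objective: faster
-- what changed: Each pass precomputes row/column sums once and updates them incrementally as cells flip, instead of re-summing a whole row and column for every cell, preserving the in-place scan order exactly.
import Mathlib
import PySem

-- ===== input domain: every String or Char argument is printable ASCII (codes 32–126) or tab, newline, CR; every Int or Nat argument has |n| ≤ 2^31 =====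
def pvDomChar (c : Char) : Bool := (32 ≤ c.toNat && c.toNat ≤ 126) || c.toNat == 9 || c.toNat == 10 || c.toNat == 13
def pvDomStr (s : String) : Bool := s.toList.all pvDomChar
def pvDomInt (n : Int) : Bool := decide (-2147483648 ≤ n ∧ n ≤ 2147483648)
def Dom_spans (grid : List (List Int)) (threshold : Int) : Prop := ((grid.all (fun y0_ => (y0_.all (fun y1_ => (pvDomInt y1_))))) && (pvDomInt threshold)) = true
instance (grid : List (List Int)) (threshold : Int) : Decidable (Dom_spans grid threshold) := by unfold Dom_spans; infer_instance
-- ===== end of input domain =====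

-- B replaces A's per-cell row+column re-summation by row/column sum arrays kept
-- up to date as cells flip during the same in-place scan (same scan order, same
-- results); both A and B mutate the caller's grid in Python — the equivalence
-- proved here is about the return value.

-- shared index helpers (value of cell (x,y); write 1 into cell (x,y))
def pvAt (g : List (List Int)) (x y : Nat) : Int := (g.getD x []).getD y 0

def setCell (g : List (List Int)) (x y : Nat) (v : Int) : List (List Int) :=
  g.set x ((g.getD x []).set y v)

-- ===== PORT A =====
def rowSum (g : List (List Int)) (n : Nat) (x : Nat) : Int :=
  ((List.range n).map (fun a => pvAt g x a)).sum

def colSum (g : List (List Int)) (n : Nat) (y : Nat) : Int :=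
  ((List.range n).map (fun a => pvAt g a y)).sum

-- Python's neighbors(previous,x,y): row sum + column sum over range(len(previous))
def neighborsA (g : List (List Int)) (x y : Nat) : Int :=
  rowSum g g.length x + colSum g g.length y

-- one cell of advance's double loop; state = (grid, altered)
def stepA (t : Int) (s : List (List Int) × Bool) (x y : Nat) : List (List Int) × Bool :=
  if pvAt s.1 x y == 1 then s
  else if t ≤ neighborsA s.1 x y then (setCell s.1 x y 1, true)
  else s

-- Python's advance (copy.copy is shallow: rows are shared, so the scan sees its own updates)
def advanceA (grid : List (List Int)) (t : Int) : List (List Int) × Bool :=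
  let n := grid.length
  (List.range n).foldl (fun s x => (List.range n).foldl (fun s y => stepA t s x y) s) (grid, false)

-- the final double loop with early `return False`
def checkA (g : List (List Int)) : Bool :=
  let n := g.length
  !((List.range n).any (fun x => (List.range n).any (fun y => pvAt g x y == 0)))

-- the while loop; fuel n*n+1 is a totality guard only (each altered pass turns
-- at least one non-1 cell of the n×n window into 1, so ≤ n*n altered passes occur)
def spansLoopA (t : Int) : Nat → List (List Int) → Bool
  | 0, g => checkA g
  | f + 1, g =>
    let s := advanceA g t
    if s.2 then spansLoopA t f s.1 else checkA s.1

def spans (grid : List (List Int)) (threshold : Int) : Bool :=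
  spansLoopA threshold (grid.length * grid.length + 1) grid

-- ===== PORT B =====
-- state = (grid, rsum, csum, altered)
def StB : Type := List (List Int) × List Int × List Int × Bool

def stepB (t : Int) (s : StB) (x y : Nat) : StB :=
  let g := s.1; let rs := s.2.1; let cs := s.2.2.1
  let v := pvAt g x y
  if (!(v == 1)) && decide (t ≤ rs.getD x 0 + cs.getD y 0) then
    (setCell g x y 1, rs.set x (rs.getD x 0 + 1 - v), cs.set y (cs.getD y 0 + 1 - v), true)
  else s

-- one pass of Source B's while-loop body: build rsum/csum once, then the double scan
def passB (n : Nat) (t : Int) (g : List (List Int)) : StB :=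
  let rs := (List.range n).map (fun x => rowSum g n x)
  let cs := (List.range n).map (fun y => colSum g n y)
  (List.range n).foldl (fun s x => (List.range n).foldl (fun s y => stepB t s x y) s) (g, rs, cs, false)

-- Source B's final `all(grid[x][y] != 0 …)`
def checkB (n : Nat) (g : List (List Int)) : Bool :=
  (List.range n).all (fun x => (List.range n).all (fun y => !(pvAt g x y == 0)))

def spansLoopB (n : Nat) (t : Int) : Nat → List (List Int) → Bool
  | 0, g => checkB n g
  | f + 1, g =>
    let s := passB n t g
    if s.2.2.2 then spansLoopB n t f s.1 else checkB n s.1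

def spans_alt (grid : List (List Int)) (threshold : Int) : Bool :=
  spansLoopB grid.length threshold (grid.length * grid.length + 1) grid

-- ===== PRECONDITION & SPEC =====
-- Pre_ excludes exactly the ragged grids on which Python A raises IndexError
-- (some row shorter than the number of rows: the very first scan reads previous[x][y]
-- for all x,y < len(grid) and hits the missing entry).
def Pre_spans (grid : List (List Int)) (threshold : Int) : Prop :=
  ∀ r ∈ grid, grid.length ≤ r.length

instance (grid : List (List Int)) (threshold : Int) : Decidable (Pre_spans grid threshold) := by
  unfold Pre_spans; infer_instance

def pvWitness_spans : List (List Int) × Int := ([[0, 1], [1, 0]], 2)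

def Spec_spans (grid : List (List Int)) (threshold : Int) (out : Bool) : Prop := out = spans_alt grid threshold
instance (grid : List (List Int)) (threshold : Int) (out : Bool) : Decidable (Spec_spans grid threshold out) := by unfold Spec_spans; infer_instance

-- ===== CLAIM (what is proved, stated in full; the proofs are below) =====
def Claim_equal_spans : Prop := ∀ (grid : List (List Int)) (threshold : Int), Dom_spans grid threshold → Pre_spans grid threshold → Spec_spans grid threshold (spans grid threshold)

-- ===== LEMMAS AND PROOFS =====

-- the invariant tying B's sum arrays to the current grid
def InvS (n : Nat) (g : List (List Int)) (rs cs : List Int) : Prop :=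
  g.length = n ∧ (∀ r ∈ g, n ≤ r.length) ∧ rs.length = n ∧ cs.length = n ∧
  (∀ x, x < n → rs.getD x 0 = rowSum g n x) ∧
  (∀ y, y < n → cs.getD y 0 = colSum g n y)

def RelS (n : Nat) (sA : List (List Int) × Bool) (sB : StB) : Prop :=
  sB.1 = sA.1 ∧ sB.2.2.2 = sA.2 ∧ InvS n sB.1 sB.2.1 sB.2.2.1

theorem getD_mem_of_lt (g : List (List Int)) (x : Nat) (hx : x < g.length) :
    g.getD x [] ∈ g := by
  simp only [List.getD_eq_getElem?_getD, List.getElem?_eq_getElem hx, Option.getD_some]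
  exact List.getElem_mem hx

theorem length_setCell (g : List (List Int)) (x y : Nat) (v : Int) :
    (setCell g x y v).length = g.length := by
  simp [setCell]

theorem rows_setCell (g : List (List Int)) (x y : Nat) (v : Int) (n : Nat)
    (h : ∀ r ∈ g, n ≤ r.length) : ∀ r ∈ setCell g x y v, n ≤ r.length := by
  intro r hr
  by_cases hx : x < g.length
  · rcases List.mem_or_eq_of_mem_set hr with h1 | h1
    · exact h r h1
    · subst h1
      rw [List.length_set]
      exact h _ (getD_mem_of_lt g x hx)
  · rw [setCell, List.set_eq_of_length_le (by omega)] at hr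
    exact h r hr

theorem pvAt_setCell (g : List (List Int)) (x y : Nat) (v : Int) (i j : Nat)
    (hx : x < g.length) :
    pvAt (setCell g x y v) i j =
      if i = x ∧ j = y ∧ y < (g.getD x []).length then v else pvAt g i j := by
  unfold pvAt setCell
  simp only [List.getD_eq_getElem?_getD]
  rw [List.getElem?_set]
  by_cases hi : x = i
  · subst hi
    simp only [hx, if_pos, Option.getD_some]
    rw [List.getElem?_set]
    by_cases hj : y = j
    · subst hj
      have hg2 : g[x]?.getD ([] : List Int) = g[x] := by simp [List.getElem?_eq_getElem hx]
      rw [hg2]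
      by_cases hyl2 : y < g[x].length
      · simp [hyl2]
      · simp [hyl2]
    · have hj' : ¬ j = y := fun h => hj h.symm
      simp [hj, hj']
  · have hi' : ¬ i = x := fun h => hi h.symm
    simp [hi, hi']

theorem sum_range_update (n y : Nat) (hy : y < n) (f : Nat → Int) (v : Int) :
    ((List.range n).map (fun a => if a = y then v else f a)).sum
      = ((List.range n).map f).sum + v - f y := by
  induction n with
  | zero => omega
  | succ m ih =>
    rw [List.range_succ, List.map_append, List.map_append, List.sum_append, List.sum_append]
    simp only [List.map_cons, List.map_nil, List.sum_cons, List.sum_nil]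
    by_cases h : m = y
    · subst h
      have : ∀ a ∈ List.range m, (if a = m then v else f a) = f a := by
        intro a ha; simp only [List.mem_range] at ha; simp [Nat.ne_of_lt ha]
      rw [List.map_congr_left this]
      simp
      ring
    · have hy' : y < m := by omega
      rw [if_neg h, ih hy']
      ring

theorem rowSum_setCell (g : List (List Int)) (n x y : Nat) (i : Nat)
    (hgl : g.length = n) (hrow : ∀ r ∈ g, n ≤ r.length)
    (hx : x < n) (hy : y < n) (v : Int) :
    rowSum (setCell g x y v) n i =
      if i = x then rowSum g n i + v - pvAt g x y else rowSum g n i := by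
  have hx' : x < g.length := by omega
  have hyl : y < (g.getD x []).length := by
    have := hrow _ (getD_mem_of_lt g x hx')
    omega
  unfold rowSum
  by_cases hi : i = x
  · subst hi
    have hpt : ∀ a ∈ List.range n, pvAt (setCell g i y v) i a = if a = y then v else pvAt g i a := by
      intro a _
      rw [pvAt_setCell g i y v i a hx']
      by_cases h : a = y
      · subst h
        rw [if_pos ⟨rfl, rfl, hyl⟩, if_pos rfl]
      · rw [if_neg (by simp [h]), if_neg h]
    rw [List.map_congr_left hpt, sum_range_update n y hy]
    simp
  · have hpt : ∀ a ∈ List.range n, pvAt (setCell g x y v) i a = pvAt g i a := by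
      intro a _
      rw [pvAt_setCell g x y v i a hx']
      simp [hi]
    rw [List.map_congr_left hpt]
    simp [hi]

theorem colSum_setCell (g : List (List Int)) (n x y : Nat) (j : Nat)
    (hgl : g.length = n) (hrow : ∀ r ∈ g, n ≤ r.length)
    (hx : x < n) (hy : y < n) (v : Int) :
    colSum (setCell g x y v) n j =
      if j = y then colSum g n j + v - pvAt g x y else colSum g n j := by
  have hx' : x < g.length := by omega
  have hyl : y < (g.getD x []).length := by
    have := hrow _ (getD_mem_of_lt g x hx')
    omega
  unfold colSum
  by_cases hj : j = y
  · subst hj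
    have hpt : ∀ a ∈ List.range n, pvAt (setCell g x j v) a j = if a = x then v else pvAt g a j := by
      intro a _
      rw [pvAt_setCell g x j v a j hx']
      by_cases h : a = x
      · subst h
        rw [if_pos ⟨rfl, rfl, hyl⟩, if_pos rfl]
      · rw [if_neg (by simp [h]), if_neg h]
    rw [List.map_congr_left hpt, sum_range_update n x hx]
    simp
  · have hpt : ∀ a ∈ List.range n, pvAt (setCell g x y v) a j = pvAt g a j := by
      intro a _
      rw [pvAt_setCell g x y v a j hx']
      simp [hj]
    rw [List.map_congr_left hpt]
    simp [hj]

theorem getD_set_self' (l : List Int) (x : Nat) (w : Int) (hx : x < l.length) :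
    (l.set x w).getD x 0 = w := by
  simp [List.getD_eq_getElem?_getD, List.getElem?_set_self hx]

theorem getD_set_ne' (l : List Int) (x i : Nat) (w : Int) (h : i ≠ x) :
    (l.set x w).getD i 0 = l.getD i 0 := by
  simp [List.getD_eq_getElem?_getD, List.getElem?_set_ne (Ne.symm h)]

theorem step_rel (n : Nat) (t : Int) (gA : List (List Int)) (aA : Bool)
    (gB : List (List Int)) (rs cs : List Int) (aB : Bool) (x y : Nat)
    (hx : x < n) (hy : y < n) (h : RelS n (gA, aA) (gB, rs, cs, aB)) :
    RelS n (stepA t (gA, aA) x y) (stepB t (gB, rs, cs, aB) x y) := by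
  obtain ⟨hg, ha, hI⟩ := h
  dsimp only at hg ha hI
  subst hg
  subst ha
  obtain ⟨hgl, hrow, hrl, hcl, hrs, hcs⟩ := hI
  have hnbr : rs.getD x 0 + cs.getD y 0 = neighborsA gB x y := by
    unfold neighborsA
    rw [hrs x hx, hcs y hy, hgl]
  by_cases h1 : pvAt gB x y = 1
  · simp [stepA, stepB, h1]
    exact ⟨rfl, rfl, hgl, hrow, hrl, hcl, hrs, hcs⟩
  · by_cases h2 : t ≤ neighborsA gB x y
    · simp only [stepA, stepB]
      rw [hnbr]
      simp [h1, h2]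
      refine ⟨rfl, rfl, ?_, ?_, ?_, ?_, ?_, ?_⟩
      · rw [length_setCell]; exact hgl
      · exact rows_setCell gB x y 1 n hrow
      · simpa using hrl
      · simpa using hcl
      · intro i hi
        rw [rowSum_setCell gB n x y i hgl hrow hx hy 1]
        by_cases hix : i = x
        · subst hix
          rw [if_pos rfl, getD_set_self' _ _ _ (by omega)]
          have h3 := hrs i hi
          rw [List.getD_eq_getElem?_getD] at h3
          rw [h3]
        · rw [if_neg hix, getD_set_ne' _ _ _ _ hix, hrs i hi]
      · intro j hj
        rw [colSum_setCell gB n x y j hgl hrow hx hy 1]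
        by_cases hjy : j = y
        · subst hjy
          rw [if_pos rfl, getD_set_self' _ _ _ (by omega)]
          have h3 := hcs j hj
          rw [List.getD_eq_getElem?_getD] at h3
          rw [h3]
        · rw [if_neg hjy, getD_set_ne' _ _ _ _ hjy, hcs j hj]
    · simp only [stepA, stepB]
      rw [hnbr]
      simp [h1, h2]
      exact ⟨rfl, rfl, hgl, hrow, hrl, hcl, hrs, hcs⟩

theorem foldl_inner (n : Nat) (t : Int) (x : Nat) (hx : x < n) (ys : List Nat)
    (hys : ∀ y ∈ ys, y < n) (sA : List (List Int) × Bool) (sB : StB)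
    (h : RelS n sA sB) :
    RelS n (ys.foldl (fun s y => stepA t s x y) sA) (ys.foldl (fun s y => stepB t s x y) sB) := by
  induction ys generalizing sA sB with
  | nil => exact h
  | cons y ys ih =>
    simp only [List.foldl_cons]
    exact ih (fun z hz => hys z (List.mem_cons_of_mem _ hz)) _ _
      (step_rel n t sA.1 sA.2 sB.1 sB.2.1 sB.2.2.1 sB.2.2.2 x y hx (hys y List.mem_cons_self) h)

theorem foldl_outer (n : Nat) (t : Int) (xs : List Nat) (hxs : ∀ x ∈ xs, x < n)
    (sA : List (List Int) × Bool) (sB : StB) (h : RelS n sA sB) :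
    RelS n (xs.foldl (fun s x => (List.range n).foldl (fun s y => stepA t s x y) s) sA)
          (xs.foldl (fun s x => (List.range n).foldl (fun s y => stepB t s x y) s) sB) := by
  induction xs generalizing sA sB with
  | nil => exact h
  | cons x xs ih =>
    simp only [List.foldl_cons]
    exact ih (fun z hz => hxs z (List.mem_cons_of_mem _ hz)) _ _
      (foldl_inner n t x (hxs x List.mem_cons_self) (List.range n)
        (fun y hy => List.mem_range.mp hy) sA sB h)

theorem getD_map_range (n i : Nat) (hi : i < n) (f : Nat → Int) :
    ((List.range n).map f).getD i 0 = f i := by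
  simp [List.getD_eq_getElem?_getD, List.getElem?_map, List.getElem?_range hi]

theorem pass_rel (n : Nat) (t : Int) (g : List (List Int))
    (hgl : g.length = n) (hrow : ∀ r ∈ g, n ≤ r.length) :
    RelS n (advanceA g t) (passB n t g) := by
  simp only [advanceA, passB]
  rw [hgl]
  exact foldl_outer n t (List.range n) (fun x hx => List.mem_range.mp hx) _ _
    ⟨rfl, rfl, hgl, hrow, by simp, by simp,
     fun x hx => getD_map_range n x hx _, fun y hy => getD_map_range n y hy _⟩

theorem check_eq (n : Nat) (g : List (List Int)) (hgl : g.length = n) :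
    checkA g = checkB n g := by
  unfold checkA checkB
  rw [hgl]
  simp [List.all_eq_not_any_not]

theorem loop_eq (n : Nat) (t : Int) (f : Nat) :
    ∀ g : List (List Int), g.length = n → (∀ r ∈ g, n ≤ r.length) →
      spansLoopA t f g = spansLoopB n t f g := by
  induction f with
  | zero => intro g hgl _; simp [spansLoopA, spansLoopB, check_eq n g hgl]
  | succ f ih =>
    intro g hgl hrow
    obtain ⟨hg, ha, hgl', hrow', _⟩ := pass_rel n t g hgl hrow
    simp only [spansLoopA, spansLoopB]
    rw [← hg, ← ha]
    by_cases halt : (passB n t g).2.2.2 = true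
    · rw [halt]
      simp only [if_true]
      exact ih _ hgl' hrow'
    · simp only [Bool.not_eq_true] at halt
      rw [halt]
      simp only [Bool.false_eq_true, if_false]
      exact check_eq n _ hgl'

-- ===== VERDICT (by name: the statement is the Claim_ definition above) =====
theorem spans_spec : Claim_equal_spans := by
  intro grid threshold _ hpre
  unfold Spec_spans spans spans_alt
  exact loop_eq grid.length threshold (grid.length * grid.length + 1) grid rfl hpre
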